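-- pv_equiv track=rewrite | github.com/jwbron/james-in-a-box | jib-container/jib-tools/create-pr-helper.py | _generate_test_plan
-- ===== SOURCE A (Python) =====
-- def _generate_test_plan(changed_files: list) -> list:
--     """Generate contextual test plan based on changed files."""
--     test_items = []
--
--     # Categorize files
--     python_files = [f for f in changed_files if f.endswith(".py")]
--     js_files = [f for f in changed_files if f.endswith((".js", ".ts", ".tsx"))]
--     test_files = [f for f in changed_files if "test" in f.lower()]
--     config_files = [f for f in changed_files if f.endswith((".yaml", ".yml", ".json", ".toml"))]
--
--     # Add relevant test commands
--     if python_files: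
--         if test_files:
--             test_items.append("Run `pytest` - verify tests pass")
--         else:
--             test_items.append("Manual testing of Python changes")
--
--     if js_files:
--         if test_files:
--             test_items.append("Run `npm test` - verify tests pass")
--         else:
--             test_items.append("Manual testing of JavaScript changes")
--
--     if config_files:
--         test_items.append("Verify configuration changes are correct")
--
--     # Always include these basics
--     if not test_items:
--         test_items.append("Manual verification of changes")
--
--     test_items.append("Code review for correctness and edge cases")
--
--     # Add specific file hints for reviewers
--     if len(changed_files) <= 5:
--         test_items.append(f"Files to review: {', '.join(changed_files)}")
--
--     return test_items
-- ===== SOURCE B (Python) =====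
-- # Table-driven rewrite: one pass classifies each file into a category set via an
-- # extension->category dict (last '.'-segment lookup) plus a 'test' tag, then a rules
-- # table drives which messages are emitted.
-- _EXT_CATEGORY = {"py": "python", "js": "js", "ts": "js", "tsx": "js",
--                  "yaml": "config", "yml": "config", "json": "config", "toml": "config"}
--
-- _RULES = [("python", "Run `pytest` - verify tests pass", "Manual testing of Python changes"),
--           ("js", "Run `npm test` - verify tests pass", "Manual testing of JavaScript changes"),
--           ("config", "Verify configuration changes are correct", "Verify configuration changes are correct")]
--
--
-- def _generate_test_plan(changed_files: list) -> list:
--     """Generate contextual test plan based on changed files."""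
--     cats = set()
--     for f in changed_files:
--         parts = f.rsplit(".", 1)
--         if len(parts) == 2:
--             cat = _EXT_CATEGORY.get(parts[1])
--             if cat:
--                 cats.add(cat)
--         if "test" in f.lower():
--             cats.add("test")
--
--     has_test = "test" in cats
--     items = [yes if has_test else no for cat, yes, no in _RULES if cat in cats]
--
--     if not items:
--         items.append("Manual verification of changes")
--     items.append("Code review for correctness and edge cases")
--     if len(changed_files) <= 5:
--         items.append("Files to review: " + ", ".join(changed_files))
--     return items
-- ===== Notes on version B (the rewrite author's own statement) =====
-- stated objective: alternative
-- what changed: Replaces the four suffix-test list comprehensions and the if/else append chain with a table-driven design: one pass classifies each file into a category set via an extension-to-category dictionary keyed by the segment after the last dot (plus a 'test' tag), and a rules table then drives which messages are emitted.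
import Mathlib
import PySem

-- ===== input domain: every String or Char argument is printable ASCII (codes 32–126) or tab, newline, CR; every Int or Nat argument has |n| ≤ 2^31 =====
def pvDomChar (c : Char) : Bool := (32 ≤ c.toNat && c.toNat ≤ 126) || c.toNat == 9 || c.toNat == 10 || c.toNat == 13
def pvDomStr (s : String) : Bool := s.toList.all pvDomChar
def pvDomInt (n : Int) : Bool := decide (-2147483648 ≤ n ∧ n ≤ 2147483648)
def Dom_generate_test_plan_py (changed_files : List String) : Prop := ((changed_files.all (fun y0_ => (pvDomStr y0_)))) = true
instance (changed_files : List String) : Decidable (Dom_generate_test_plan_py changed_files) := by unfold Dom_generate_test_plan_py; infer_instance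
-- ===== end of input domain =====

-- B is a table-driven rewrite: one pass classifies each file into a category set via
-- an extension→category dictionary (segment after the last '.') plus a 'test' tag,
-- and a fixed rules table then emits the messages; return values are identical.

-- ===== PORT A =====
def pvIsPy (f : String) : Bool := PySem.Str.endswith f ".py"
def pvIsJs (f : String) : Bool :=
  PySem.Str.endswith f ".js" || PySem.Str.endswith f ".ts" || PySem.Str.endswith f ".tsx"
def pvIsTest (f : String) : Bool := PySem.Str.isIn "test" (PySem.Str.lower f)
def pvIsConfig (f : String) : Bool :=
  PySem.Str.endswith f ".yaml" || PySem.Str.endswith f ".yml" ||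
  PySem.Str.endswith f ".json" || PySem.Str.endswith f ".toml"

def generate_test_plan_py (changed_files : List String) : List String :=
  let python_files := changed_files.filter pvIsPy
  let js_files := changed_files.filter pvIsJs
  let test_files := changed_files.filter pvIsTest
  let config_files := changed_files.filter pvIsConfig
  let test_items : List String := []
  let test_items :=
    if !python_files.isEmpty then
      test_items ++ [if !test_files.isEmpty then "Run `pytest` - verify tests pass"
                     else "Manual testing of Python changes"]
    else test_items
  let test_items :=
    if !js_files.isEmpty then
      test_items ++ [if !test_files.isEmpty then "Run `npm test` - verify tests pass"
                     else "Manual testing of JavaScript changes"]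
    else test_items
  let test_items :=
    if !config_files.isEmpty then
      test_items ++ ["Verify configuration changes are correct"]
    else test_items
  let test_items :=
    if test_items.isEmpty then test_items ++ ["Manual verification of changes"] else test_items
  let test_items := test_items ++ ["Code review for correctness and edge cases"]
  let test_items :=
    if changed_files.length ≤ 5 then
      test_items ++ ["Files to review: " ++ PySem.Str.join ", " changed_files]
    else test_items
  test_items

-- ===== PORT B =====
-- extension → category table (_EXT_CATEGORY); keys are the Python key strings as char lists
def pvExtCat : PySem.Dict (List Char) String :=
  PySem.Dict.ofList
    [("py".toList, "python"), ("js".toList, "js"), ("ts".toList, "js"), ("tsx".toList, "js"),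
     ("yaml".toList, "config"), ("yml".toList, "config"), ("json".toList, "config"),
     ("toml".toList, "config")]

-- rules table (_RULES): (category, message with tests, message without tests)
def pvRules : List (String × String × String) :=
  [("python", "Run `pytest` - verify tests pass", "Manual testing of Python changes"),
   ("js", "Run `npm test` - verify tests pass", "Manual testing of JavaScript changes"),
   ("config", "Verify configuration changes are correct", "Verify configuration changes are correct")]

-- hand port of f.rsplit(".", 1): `some e` = the segment after the LAST '.', `none` = no '.'
-- (exact: rsplit(".",1) returns two parts exactly when '.' occurs, the second part
--  being everything after the last '.')
def pvLastSeg? : List Char → Option (List Char)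
  | [] => none
  | c :: rest =>
    match pvLastSeg? rest with
    | some e => some e
    | none => if c = '.' then some rest else none

-- cat = _EXT_CATEGORY.get(parts[1]) when len(parts) == 2
def pvCatOf (f : String) : Option String :=
  match pvLastSeg? f.toList with
  | none => none
  | some e => PySem.Dict.get? pvExtCat e

def generate_test_plan_py_alt (changed_files : List String) : List String :=
  let cats : PySem.Set String :=
    changed_files.foldl
      (fun s f =>
        let s := match pvCatOf f with
                 | some c => PySem.Set.add s c      -- `if cat: cats.add(cat)`
                 | none => s
        if pvIsTest f then PySem.Set.add s "test" else s)
      PySem.Set.empty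
  let has_test := PySem.Set.contains cats "test"
  -- [yes if has_test else no for cat, yes, no in _RULES if cat in cats]
  let items :=
    pvRules.foldl
      (fun acc r =>
        if PySem.Set.contains cats r.1 then acc ++ [if has_test then r.2.1 else r.2.2]
        else acc)
      []
  let items := if items.isEmpty then items ++ ["Manual verification of changes"] else items
  let items := items ++ ["Code review for correctness and edge cases"]
  if changed_files.length ≤ 5 then
    items ++ ["Files to review: " ++ PySem.Str.join ", " changed_files]
  else items

-- ===== PRECONDITION & SPEC =====
def Spec_generate_test_plan_py (changed_files : List String) (out : List String) : Prop := out = generate_test_plan_py_alt changed_files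
instance (changed_files : List String) (out : List String) : Decidable (Spec_generate_test_plan_py changed_files out) := by unfold Spec_generate_test_plan_py; infer_instance

-- ===== CLAIM (what is proved, stated in full; the proofs are below) =====
def Claim_equal_generate_test_plan_py : Prop := ∀ (changed_files : List String), Dom_generate_test_plan_py changed_files → Spec_generate_test_plan_py changed_files (generate_test_plan_py changed_files)

-- ===== LEMMAS AND PROOFS =====

theorem pvLastSeg?_isSome_mem {l : List Char} (h : (pvLastSeg? l).isSome) : '.' ∈ l := by
  induction l with
  | nil => simp [pvLastSeg?] at h
  | cons c rest ih =>
    cases hr : pvLastSeg? rest with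
    | some x => exact List.mem_cons_of_mem _ (ih (by simp [hr]))
    | none =>
      simp only [pvLastSeg?, hr] at h
      by_cases hc : c = '.'
      · simp [hc]
      · simp [hc] at h

/-- The segment after the last `'.'` is `E` iff `'.' :: E` is a suffix (for dot-free `E`). -/
theorem pvLastSeg?_iff_suffix (E : List Char) (hE : '.' ∉ E) (l : List Char) :
    pvLastSeg? l = some E ↔ ('.' :: E) <:+ l := by
  induction l with
  | nil => simp [pvLastSeg?]
  | cons c rest ih =>
    rw [List.suffix_cons_iff]
    cases hr : pvLastSeg? rest with
    | some x =>
      simp only [pvLastSeg?, hr, Option.some.injEq]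
      constructor
      · intro h; subst h; right; exact ih.mp hr
      · rintro (h | h)
        · exfalso
          have hm : '.' ∈ rest := pvLastSeg?_isSome_mem (by simp [hr])
          injection h with _ h2
          rw [← h2] at hm
          exact hE hm
        · have h' := ih.mpr h
          rw [hr] at h'
          exact Option.some.inj h'
    | none =>
      simp only [pvLastSeg?, hr]
      by_cases hc : c = '.'
      · subst hc
        simp only [if_true, Option.some.injEq]
        constructor
        · intro h; subst h; left; rfl
        · rintro (h | h)
          · injection h with _ h2; exact h2.symm
          · exact absurd (ih.mpr h) (by simp [hr])
      · simp only [if_neg hc]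
        constructor
        · intro h; simp at h
        · rintro (h | h)
          · injection h with h1 _; exact absurd h1.symm hc
          · exact absurd (ih.mpr h) (by simp [hr])

theorem pvExtCat_get (e : List Char) :
    PySem.Dict.get? pvExtCat e =
      (if "py".toList = e then some "python"
       else if "js".toList = e then some "js"
       else if "ts".toList = e then some "js"
       else if "tsx".toList = e then some "js"
       else if "yaml".toList = e then some "config"
       else if "yml".toList = e then some "config"
       else if "json".toList = e then some "config"
       else if "toml".toList = e then some "config"
       else none) := by
  have h : pvExtCat = PySem.Dict.mk
      [("py".toList, "python"), ("js".toList, "js"), ("ts".toList, "js"), ("tsx".toList, "js"),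
       ("yaml".toList, "config"), ("yml".toList, "config"), ("json".toList, "config"),
       ("toml".toList, "config")] := by decide
  rw [h]
  simp only [PySem.Dict.get?_mk_cons, beq_iff_eq]
  rfl

theorem pv_endswith_lastSeg (f p : String) (E : List Char) (hp : p.toList = '.' :: E)
    (hE : '.' ∉ E) :
    PySem.Str.endswith f p = true ↔ pvLastSeg? f.toList = some E := by
  rw [PySem.Str.endswith_eq, hp, PySem.Chars.endswith_iff, pvLastSeg?_iff_suffix E hE]

theorem pvCat_python (f : String) : pvCatOf f = some "python" ↔ pvIsPy f = true := by
  rw [pvIsPy, pv_endswith_lastSeg f ".py" "py".toList rfl (by decide)]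
  cases hs : pvLastSeg? f.toList with
  | none => simp [pvCatOf, hs]
  | some e =>
    simp only [pvCatOf, hs, pvExtCat_get, Option.some.injEq]
    split_ifs with h1 h2 h3 h4 h5 h6 h7 h8 <;> try (subst_eqs; decide)
    simp only [false_iff]
    intro h
    exact h1 h.symm

theorem pvCat_js (f : String) : pvCatOf f = some "js" ↔ pvIsJs f = true := by
  rw [pvIsJs]
  simp only [Bool.or_eq_true]
  rw [pv_endswith_lastSeg f ".js" "js".toList rfl (by decide),
      pv_endswith_lastSeg f ".ts" "ts".toList rfl (by decide),
      pv_endswith_lastSeg f ".tsx" "tsx".toList rfl (by decide)]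
  cases hs : pvLastSeg? f.toList with
  | none => simp [pvCatOf, hs]
  | some e =>
    simp only [pvCatOf, hs, pvExtCat_get, Option.some.injEq]
    split_ifs with h1 h2 h3 h4 h5 h6 h7 h8 <;> try (subst_eqs; decide)
    simp only [false_iff]
    rintro ((h | h) | h)
    exacts [h2 h.symm, h3 h.symm, h4 h.symm]

theorem pvCat_config (f : String) : pvCatOf f = some "config" ↔ pvIsConfig f = true := by
  rw [pvIsConfig]
  simp only [Bool.or_eq_true]
  rw [pv_endswith_lastSeg f ".yaml" "yaml".toList rfl (by decide),
      pv_endswith_lastSeg f ".yml" "yml".toList rfl (by decide),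
      pv_endswith_lastSeg f ".json" "json".toList rfl (by decide),
      pv_endswith_lastSeg f ".toml" "toml".toList rfl (by decide)]
  cases hs : pvLastSeg? f.toList with
  | none => simp [pvCatOf, hs]
  | some e =>
    simp only [pvCatOf, hs, pvExtCat_get, Option.some.injEq]
    split_ifs with h1 h2 h3 h4 h5 h6 h7 h8 <;> try (subst_eqs; decide)
    simp only [false_iff]
    rintro (((h | h) | h) | h)
    exacts [h5 h.symm, h6 h.symm, h7 h.symm, h8 h.symm]

theorem pvCat_not_test (f : String) : pvCatOf f ≠ some "test" := by
  cases hs : pvLastSeg? f.toList with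
  | none => simp [pvCatOf, hs]
  | some e =>
    simp only [pvCatOf, hs, pvExtCat_get]
    split_ifs <;> simp

set_option maxHeartbeats 1000000 in
/-- Membership in the category set built by B's loop. -/
theorem pv_mem_cats (xs : List String) (s : PySem.Set String) (c : String) :
    c ∈ xs.foldl
        (fun s f =>
          let s := match pvCatOf f with
                   | some c => PySem.Set.add s c
                   | none => s
          if pvIsTest f then PySem.Set.add s "test" else s) s ↔
      c ∈ s ∨ ∃ f ∈ xs, pvCatOf f = some c ∨ (pvIsTest f = true ∧ c = "test") := by
  induction xs generalizing s with
  | nil => simp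
  | cons x xs ih =>
    rw [List.foldl_cons, ih]
    cases hc : pvCatOf x <;> cases ht : pvIsTest x <;>
      simp [hc, ht, PySem.Set.mem_add] <;> aesop

theorem pv_contains_cats (xs : List String) (c : String) (p : String → Bool)
    (hc : c ≠ "test") (hp : ∀ f, pvCatOf f = some c ↔ p f = true) :
    PySem.Set.contains
      (xs.foldl
        (fun s f =>
          let s := match pvCatOf f with
                   | some c => PySem.Set.add s c
                   | none => s
          if pvIsTest f then PySem.Set.add s "test" else s) PySem.Set.empty) c = xs.any p := by
  rw [Bool.eq_iff_iff, PySem.Set.contains_iff, pv_mem_cats, List.any_eq_true]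
  constructor
  · rintro (h | ⟨f, hf, hcat | ⟨_, rfl⟩⟩)
    · exact absurd h (by simp [PySem.Set.empty])
    · exact ⟨f, hf, (hp f).mp hcat⟩
    · exact absurd rfl hc
  · rintro ⟨f, hf, hpf⟩
    exact Or.inr ⟨f, hf, Or.inl ((hp f).mpr hpf)⟩

theorem pv_contains_cats_test (xs : List String) :
    PySem.Set.contains
      (xs.foldl
        (fun s f =>
          let s := match pvCatOf f with
                   | some c => PySem.Set.add s c
                   | none => s
          if pvIsTest f then PySem.Set.add s "test" else s) PySem.Set.empty) "test" =
      xs.any pvIsTest := by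
  rw [Bool.eq_iff_iff, PySem.Set.contains_iff, pv_mem_cats, List.any_eq_true]
  constructor
  · rintro (h | ⟨f, hf, hcat | ⟨ht, _⟩⟩)
    · exact absurd h (by simp [PySem.Set.empty])
    · exact absurd hcat (pvCat_not_test f)
    · exact ⟨f, hf, ht⟩
  · rintro ⟨f, hf, hpf⟩
    exact Or.inr ⟨f, hf, Or.inr ⟨hpf, rfl⟩⟩

theorem pv_isEmpty_filter {α : Type} (p : α → Bool) (xs : List α) :
    (xs.filter p).isEmpty = !xs.any p := by
  induction xs with
  | nil => rfl
  | cons x xs ih => by_cases h : p x <;> simp [h, ih]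

-- ===== VERDICT (by name: the statement is the Claim_ definition above) =====
theorem generate_test_plan_py_spec : Claim_equal_generate_test_plan_py := by
  intro xs _
  unfold Spec_generate_test_plan_py generate_test_plan_py generate_test_plan_py_alt
  simp only [pvRules, List.foldl_cons, List.foldl_nil,
    pv_contains_cats xs "python" pvIsPy (by decide) pvCat_python,
    pv_contains_cats xs "js" pvIsJs (by decide) pvCat_js,
    pv_contains_cats xs "config" pvIsConfig (by decide) pvCat_config,
    pv_contains_cats_test xs,
    pv_isEmpty_filter, Bool.not_not]
  cases hpy : xs.any pvIsPy <;> cases hjs : xs.any pvIsJs <;>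
    cases hcfg : xs.any pvIsConfig <;> cases ht : xs.any pvIsTest <;> simp
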